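/- GENERATED by mk_final_copies.py from the proof of the farm's unit `start_decoder.9f` (farm:start_decoder.9f.1: Proof.lean) as the
   re-elaboration sweep compiled it — do not edit. -/
import Asan.CheckWalk
import Vorbis.Spec.Units.start_decoder_9f

/-!
  Unit `start_decoder.9f`: the child "the request fits" of the split of segment `.9` of start_decoder (Vorbis/Spec/StartDecoder9.lean).
  The walk is the farm worker's `seg9e_ok` (unit start_decoder.9, attempt 1), with the two steps that did not finish there redone:
  the footprint through memset by `Mem.SameExcept.mono` / `.trans` with explicit windows (`hW`, `hM`: no `u_omega` over `InSpans`
  disjunctions in the walk's context), the window conditions by the tree lemma `S9.fitWins_ok`. 52 s.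
-/

open X86 X86.User Asan Vorbis Vorbis.Spec Vorbis.Spec.StartDecoder Vorbis.Spec.StartDecoder.P1 Vorbis.Spec.StartDecoder.S9

set_option maxRecDepth 4000
set_option maxHeartbeats 4000000

namespace Vorbis.Spec.start_decoder_9f

set_option maxHeartbeats 8000000 in
/-- **Segment `.9`, part e, THE ALLOCATION SUCCEEDS** (0x11421f … 0x11428b): the store of `codebook_count` (check 0x11422a),
`setup_malloc(f, 2120 · count)` returning the new block `B + S + 32` (`Fits`: the ghost arena becomes `A.1.pushSetup N`, the block one
more live object), the store of `codebooks` (check 0x11424f, under the allocator's new shadow layer), the re-load of the count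
(check 0x11426b), `memset(codebooks, 0, 2120 · count)`: the hand-over assertion `AtC1` by `c1_exit`. The size is the opaque `N`
(`hN : N = 2120 · (n + 1)`, substituted at the end): `omega` does not like the product in a goal with this context. -/
theorem seg9e_ok (Lay : Layout) (hLay : Lay.hi = 0x1000000) (μ : Microarch) (hμ : UserX.MicroOK μ) (u₀ : State)
    (hcode : HasCodeNat Lay u₀ Vorbis.L.start_decoder.entry Vorbis.Code.code_start_decoder.nat Vorbis.L.start_decoder.size)
    (h_err : ∀ (others : List Obj) (frames : List (Nat × FrameLayout)),
      Calls Lay μ Vorbis.WayInv (Vorbis.conv u₀) Vorbis.L.error.entry (Vorbis.Spec.error.spec others frames))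
    (h_st4 : Asan.SmallCheck Lay μ Vorbis.WayInv (Vorbis.CodeOK u₀) [.rax, .rcx, .rdx] 4 Vorbis.L.__asan_store4_noabort.entry)
    (h_sm : ∀ (others : List Obj) (frames : List (Nat × FrameLayout)) (A : Arena),
      Calls Lay μ Vorbis.WayInv (Vorbis.conv u₀) Vorbis.L.setup_malloc.entry (Vorbis.Spec.setup_malloc.spec others frames A))
    (h_st8 : Asan.SmallCheck Lay μ Vorbis.WayInv (Vorbis.CodeOK u₀) [.rax, .rcx, .rdx] 8 Vorbis.L.__asan_store8_noabort.entry)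
    (h_ld4 : Asan.SmallCheck Lay μ Vorbis.WayInv (Vorbis.CodeOK u₀) [.rax, .rcx, .rdx] 4 Vorbis.L.__asan_load4_noabort.entry)
    (h_ms : ∀ (others : List Obj) (frames : List (Nat × FrameLayout)),
      Calls Lay μ Vorbis.WayInv (Vorbis.conv u₀) Vorbis.L.memset.entry (Vorbis.Spec.memset.spec others frames))
    (g : Ghost) (A : Arena × List Obj) (v : State) (n : Nat) (hb : In9 u₀ g Vorbis.L.start_decoder.cut78 A v)
    (hn : n < 256) (hrax : v.reg .rax = UInt64.ofNat n) (N : Nat) (hN : N = 2120 * (n + 1)) (hfit : A.1.Fits N) :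
    ReachVia Lay μ WayInv v (fun w => AtC1 u₀ g w ∨ AtERR u₀ g w) := by
  have he := hb.frame.entry
  v_entry he
  simp only [depth] at he_room he_stack
  have hlay := layout_facts hb.frame hb.hand hb.sd
  have eRA : g.RA = (g.e.reg .rsp).toNat := rfl
  have ef : g.f = (g.e.reg .rdi).toNat := rfl
  rw [eRA, ef] at hlay
  obtain ⟨hRA, hR8, _, _, hfstack, hflo, hfhi, hflog, hfcrc, hfout, hAstack, hAcrc, hAhi, hAlo⟩ := hlay
  have w_rip := hb.frame.rip
  have w_rsp : v.reg .rsp = g.e.reg .rsp - 1480 := by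
    rw [hb.frame.rsp]
    apply UInt64.toNat_inj.mp
    rw [toNat_addr _ (by omega)]
    u_omega
  have w_rbp : v.reg .rbp = g.e.reg .rdi := by
    rw [hb.rbp]
    exact addr_toNat _
  have hRw : g.e.reg .rsp - 1480 = addr g.R := by
    rw [← w_rsp]
    exact hb.frame.rsp
  have c_rsp := w_rsp
  have c_rbp := w_rbp
  have w_eq : Mem.EqOn Vorbis.L.textLo Vorbis.L.textHi u₀.mem v.mem := hb.frame.code
  have hdf : v.flags .df = false := (show abiInv _ from hb.frame.inv).1
  have hmx : v.mxcsr &&& 0x1F80 = 0x1F80 := (show abiInv _ from hb.frame.inv).2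
  have hsse := Vorbis.sseOK_of_abiInv hb.frame.inv
  have henvR : ReaderEnv A.2 g.frames' (g.Blk A) g.len g.f := readerEnv hb.hand hb.sd.env.live
  have hobjL : LiveIn A.2 g.frames' g.f Off.sizeof.stb_vorbis := hb.hand.obj.mono (sub_frames' g A)
  have w_rax := hrax
  have hsm' := h_sm A.2 g.frames' A.1
  have herr' := h_err A.2 g.frames'
  u_walk hcode [hμ.vendor] until [Vorbis.L.start_decoder.cut4] span [Vorbis.L.textLo, Vorbis.L.textHi] side (v_side)
  case check_11422a =>
    -- the store `f->codebook_count = …`: inside `*f`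
    have hun : ShadowUntouched v.mem s_11422a.mem := by v_untouched
    refine hobjL.accSmall hb.frame.shadow hun _ 4 (by decide) ?_ ?_
    · rw [ef]
      u_omega
    · rw [ef]
      simp only [Vorbis.Off.sizeof.stb_vorbis]
      u_omega
  case call_inv =>
    v_inv
  case pre_114240 =>
    -- setup_malloc(f, 2120 · count): the arena layer, after the store of `codebook_count`
    have hun : ShadowUntouched v.mem s_114240.mem := by v_untouched
    have hrsp8 : (s_114240.reg .rsp).toNat + 8 = g.R := by
      rw [w_rsp]
      u_omega
    refine ⟨⟨?_, hb.frame.offText⟩, ?_, ?_, hb.hand.arenaText⟩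
    · rw [hrsp8]
      exact hb.frame.shadow.untouched hun
    · rw [w_rdi, ← ef]
      exact hb.sd.env.live _ hb.sd.bits.OB1
    · rw [w_rdi, ← ef]
      have hs : Mem.SameExcept
          [⟨(g.e.reg .rsp).toNat - 1888, (g.e.reg .rsp).toNat - 1480⟩,
           ⟨(g.e.reg .rdi).toNat + 160, (g.e.reg .rdi).toNat + 164⟩] v.mem s_114240.mem := by
        rw [w_mem]
        u_same
      refine ArenaOK.transfer hb.sd.arena (ObjEq.of_sameExcept hs ?_ ?_)
      · intro w hw
        simp only [ArenaFields.wins, List.mem_cons, List.mem_nil_iff, or_false] at hw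
        subst hw
        simp only []
        omega
      · intro w hw s hsp
        simp only [ArenaFields.wins, List.mem_cons, List.mem_nil_iff, or_false] at hw hsp
        subst hw
        rcases hsp with rfl | rfl
        · simp only []
          omega
        · simp only []
          omega
  -- after setup_malloc (0x114245)
  v_after_call w_rsp_114240 w_mem_114240
  simp only [w_rdi_114240] at w_same
  have hNle : N ≤ 542720 := by
    rw [hN]
    omega
  have hsz : (s_114240.reg .rsi).toNat % 2 ^ 32 = N := by
    rw [w_rsi_114240, sz_toNat n hn, ← hN]
    omega
  rw [hsz] at w_same
  obtain ⟨hp1, hp2⟩ := w_post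
  rw [hsz, w_rdi_114240, ← ef] at hp1 hp2
  have hbnd := (show ArenaOK A.1 A.2 v.mem g.f from hb.sd.arena).bounds
  -- the allocation succeeded: rax = B + S + 32, the new ghost arena, the new block one more live object
  obtain ⟨hraxN, harena1, hsh1⟩ := hp1 hfit
  have hrsp8 : (s_114240.reg .rsp).toNat + 8 = g.R := by
    rw [w_rsp_114240]
    u_omega
  rw [hrsp8] at hsh1
  have hfitN : A.1.S + 32 + r8 (N) ≤ A.1.T := hfit
  have hle8 := le_r8 (N)
  have w_rax : s_114240r.reg .rax = addr (A.1.B + A.1.S + 32) := eq_addr _ _ hraxN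
  have hPlt : A.1.B + A.1.S + 32 < 2 ^ 64 := by omega
  have hPto : (addr (A.1.B + A.1.S + 32)).toNat = A.1.B + A.1.S + 32 := toNat_addr _ hPlt
  have hcnt0 : s_114240.mem.readLE (g.e.reg Reg.rdi + 160) 4 = n + 1 := by
    rw [w_mem_114240, ← cnt_toNat n hn]
    u_read
  have hcnt1 : s_114240r.mem.readLE (g.e.reg Reg.rdi + 160) 4 = n + 1 := by
    rw [w_same.readLE (g.e.reg Reg.rdi + 160) 4 (by u_omega) ?_]
    · rw [← w_mem_114240]
      exact hcnt0
    · simp only [List.forall_mem_cons, List.not_mem_nil, false_imp_iff, implies_true, and_true, shadowSpan]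
      repeat' apply And.intro
      all_goals u_omega
  have hms' := h_ms (A.1.newSetupObj (N) :: A.2) g.frames'
  clear herr'
  have hlt : (g.e.reg Reg.rsp - 1488).toNat + 8 ≤ 0xC00000 := by u_omega
  have hlt2 : (g.e.reg Reg.rdi + 168).toNat + 8 ≤ 0xC00000 := by u_omega
  have hsubO : ∀ o, o ∈ stackObjs g.frames' ++ A.2 →
      o ∈ stackObjs g.frames' ++ (A.1.newSetupObj (N) :: A.2) := by
    intro o ho
    rcases List.mem_append.mp ho with h1 | h2
    · exact List.mem_append_left _ h1
    · exact List.mem_append_right _ (List.mem_cons_of_mem _ h2)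
  have hobjL' : LiveIn (A.1.newSetupObj (N) :: A.2) g.frames' g.f Off.sizeof.stb_vorbis :=
    hobjL.mono hsubO
  have hoffT : ∀ o, o ∈ A.1.newSetupObj (N) :: A.2 → L.textHi ≤ o.base := by
    intro o ho
    rcases List.mem_cons.mp ho with rfl | hm
    · have eb : (A.1.newSetupObj (N)).base = A.1.B + (A.1.S + 32) := rfl
      have := hb.hand.arenaText
      omega
    · exact hb.frame.offText o hm
  have hS1 : Mem.SameExcept
      [⟨(g.e.reg .rsp).toNat - 1888, (g.e.reg .rsp).toNat - 1480⟩,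
         ⟨(g.e.reg .rdi).toNat + 8, (g.e.reg .rdi).toNat + 12⟩,
         ⟨(g.e.reg .rdi).toNat + 128, (g.e.reg .rdi).toNat + 132⟩,
         ⟨(g.e.reg .rdi).toNat + 160, (g.e.reg .rdi).toNat + 176⟩,
         shadowSpan (A.1.B + A.1.S + 32) (A.1.B + A.1.S + 32 + N),
         ⟨A.1.B + A.1.S + 32, A.1.B + A.1.S + 32 + N⟩] v.mem s_114240r.mem := by
    refine Vorbis.Spec.Reader.sameExcept_through_callee ?_ w_same ?_
    · u_same
    · simp only [List.forall_mem_cons, List.not_mem_nil, false_imp_iff, implies_true, and_true, X86.User.inSpans_cons,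
        X86.User.inSpans_nil, or_false, shadowSpan]
      repeat' apply And.intro
      all_goals u_omega
  u_walk hcode [hμ.vendor] until [Vorbis.L.start_decoder.cut4] span [Vorbis.L.textLo, Vorbis.L.textHi] side (v_side)
  case check_11424f =>
    -- the store `f->codebooks = …`: inside `*f`, under the allocator's new shadow layer
    have hun' : ShadowUntouched s_114240r.mem s_11424f.mem := by
      rw [w_mem]
      exact untouched_write (fun _ _ _ => rfl) _ 8 _ hlt
    refine hobjL'.accSmall hsh1 hun' _ 8 (by decide) ?_ ?_
    · rw [ef]
      u_omega
    · rw [ef]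
      simp only [Vorbis.Off.sizeof.stb_vorbis]
      u_omega
  case check_11426b =>
    -- the load of `f->codebook_count`
    have hun' : ShadowUntouched s_114240r.mem s_11426b.mem := by
      rw [w_mem]
      refine untouched_write ?_ _ 8 _ hlt
      refine untouched_write ?_ _ 8 _ hlt2
      refine untouched_write ?_ _ 8 _ hlt
      exact fun _ _ _ => rfl
    refine hobjL'.accSmall hsh1 hun' _ 4 (by decide) ?_ ?_
    · rw [ef]
      u_omega
    · rw [ef]
      simp only [Vorbis.Off.sizeof.stb_vorbis]
      u_omega
  case call_inv =>
    v_inv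
  case pre_114286 =>
    -- memset(codebooks, 0, 2120 · count): the block the allocator returned is ONE live object
    have hun' : ShadowUntouched s_114240r.mem s_114286.mem := by
      rw [w_mem]
      refine untouched_write ?_ _ 8 _ hlt
      refine untouched_write ?_ _ 8 _ hlt2
      refine untouched_write ?_ _ 8 _ hlt
      exact fun _ _ _ => rfl
    have hrsp8' : (s_114286.reg .rsp).toNat + 8 = g.R := by
      rw [w_rsp]
      u_omega
    refine ⟨⟨?_, hoffT⟩, Or.inr ?_⟩
    · rw [hrsp8']
      exact hsh1.untouched hun'
    · have e1 : (s_114286.reg .rdi).toNat = A.1.B + A.1.S + 32 := by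
        rw [w_rdi]
        exact hPto
      have e2 : (s_114286.reg .rdx).toNat = N := by
        rw [w_rdx, rdx_toNat n hn, hN]
      rw [e1, e2]
      have eb : (A.1.newSetupObj (N)).base = A.1.B + (A.1.S + 32) := rfl
      have es : (A.1.newSetupObj (N)).size = N := rfl
      refine ⟨A.1.newSetupObj (N), List.mem_append_right _ List.mem_cons_self, ?_, ?_⟩
      · rw [eb]
        omega
      · rw [eb, es, Nat.add_assoc A.1.B]
        exact Nat.le_refl _
  -- after memset (0x11428b): the exit to part C
  have hunP : ShadowUntouched s_114240r.mem s_114286.mem := by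
    rw [w_mem_114286]
    refine untouched_write ?_ _ 8 _ hlt
    refine untouched_write ?_ _ 8 _ hlt2
    refine untouched_write ?_ _ 8 _ hlt
    exact fun _ _ _ => rfl
  have hcbS : s_114286.mem.readLE (g.e.reg Reg.rdi + 168) 8 = A.1.B + A.1.S + 32 := by
    have h0 : s_114286.mem.readLE (g.e.reg Reg.rdi + 168) 8 = (addr (A.1.B + A.1.S + 32)).toNat := by
      rw [w_mem_114286]
      u_read
    rw [hPto] at h0
    exact h0
  have hcntS : s_114286.mem.readLE (g.e.reg Reg.rdi + 160) 4 = n + 1 := by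
    rw [w_mem_114286]
    u_frame hcnt1
  v_after_call w_rsp_114286 w_mem_114286
  have e1 : (s_114286.reg .rdi).toNat = A.1.B + A.1.S + 32 := by
    rw [w_rdi_114286]
    exact hPto
  have e2 : (s_114286.reg .rdx).toNat = N := by
    rw [w_rdx_114286, rdx_toNat n hn, hN]
  simp only [e1, e2] at w_same
  obtain ⟨_, hunM, hfill⟩ := w_post
  have hPN : A.1.B + A.1.S + 32 + N ≤ A.1.B + A.1.L := by omega
  have t160 : (g.e.reg Reg.rdi + 160).toNat = (g.e.reg .rdi).toNat + 160 := by u_omega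
  have t168 : (g.e.reg Reg.rdi + 168).toNat = (g.e.reg .rdi).toNat + 168 := by u_omega
  have tsp : (g.e.reg Reg.rsp - 1488).toNat = (g.e.reg .rsp).toNat - 1488 := by u_omega
  have hcbF : s_114286r.mem.readLE (g.e.reg Reg.rdi + 168) 8 = A.1.B + A.1.S + 32 := by
    rw [w_same.readLE (g.e.reg Reg.rdi + 168) 8 (by rw [t168]; omega) ?_]
    · rw [← w_mem_114286]
      exact hcbS
    · simp only [List.forall_mem_cons, List.not_mem_nil, false_imp_iff, implies_true, and_true, t168, tsp]
      constructor
      · omega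
      · omega
  have hcntF : s_114286r.mem.readLE (g.e.reg Reg.rdi + 160) 4 = n + 1 := by
    rw [w_same.readLE (g.e.reg Reg.rdi + 160) 4 (by rw [t160]; omega) ?_]
    · rw [← w_mem_114286]
      exact hcntS
    · simp only [List.forall_mem_cons, List.not_mem_nil, false_imp_iff, implies_true, and_true, t160, tsp]
      constructor
      · omega
      · omega
  -- the caller's own stores since the allocator returned (two return addresses, `codebooks`), as a literal footprint
  have hW : Mem.SameExcept
      [⟨(g.e.reg .rsp).toNat - 1888, (g.e.reg .rsp).toNat - 1480⟩,
       ⟨(g.e.reg .rdi).toNat + 168, (g.e.reg .rdi).toNat + 176⟩] s_114240r.mem s_114286.mem := by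
    rw [w_mem_114286]
    u_same
  -- memset's footprint inside the caller's: its 64 bytes of stack, the new block
  have hM : ∀ (ws : List Span), (⟨(g.e.reg .rsp).toNat - 1888, (g.e.reg .rsp).toNat - 1480⟩ : Span) ∈ ws →
      (⟨A.1.B + A.1.S + 32, A.1.B + A.1.S + 32 + N⟩ : Span) ∈ ws → Mem.SameExcept ws s_114286.mem s_114286r.mem := by
    intro ws hm1 hm2
    have hcallee := w_same
    rw [← w_mem_114286] at hcallee
    refine Mem.SameExcept.mono hcallee ?_
    intro w hw a ha1 ha2
    simp only [List.mem_cons, List.mem_nil_iff, or_false] at hw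
    rcases hw with rfl | rfl
    · refine ⟨_, hm1, ?_, ?_⟩
      · simp only [tsp] at ha1 ⊢
        omega
      · simp only [tsp] at ha2 ⊢
        omega
    · exact ⟨_, hm2, ha1, ha2⟩
  have hS2 : Mem.SameExcept
      [⟨(g.e.reg .rsp).toNat - 1888, (g.e.reg .rsp).toNat - 1480⟩,
         ⟨(g.e.reg .rdi).toNat + 8, (g.e.reg .rdi).toNat + 12⟩,
         ⟨(g.e.reg .rdi).toNat + 128, (g.e.reg .rdi).toNat + 132⟩,
         ⟨(g.e.reg .rdi).toNat + 160, (g.e.reg .rdi).toNat + 176⟩,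
         shadowSpan (A.1.B + A.1.S + 32) (A.1.B + A.1.S + 32 + N),
         ⟨A.1.B + A.1.S + 32, A.1.B + A.1.S + 32 + N⟩] v.mem s_114286r.mem := by
    refine (hS1.trans (Mem.SameExcept.mono hW ?_)).trans (hM _ ?_ ?_)
    · intro w hw a ha1 ha2
      simp only [List.mem_cons, List.mem_nil_iff, or_false] at hw
      rcases hw with rfl | rfl
      · exact ⟨_, List.mem_cons_self, ha1, ha2⟩
      · refine ⟨⟨(g.e.reg .rdi).toNat + 160, (g.e.reg .rdi).toNat + 176⟩, ?_, ?_, ?_⟩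
        · simp only [List.mem_cons, true_or, or_true]
        · simp only [] at ha1 ⊢
          omega
        · simp only [] at ha2 ⊢
          omega
    · exact List.mem_cons_self
    · simp only [List.mem_cons, List.mem_nil_iff, or_true, or_false]
  have hQ : Mem.SameExcept
      [⟨(g.e.reg .rsp).toNat - 1888, (g.e.reg .rsp).toNat - 1480⟩,
       ⟨(g.e.reg .rdi).toNat + 168, (g.e.reg .rdi).toNat + 176⟩,
       ⟨A.1.B + A.1.S + 32, A.1.B + A.1.S + 32 + N⟩] s_114240r.mem s_114286r.mem := by
    refine (Mem.SameExcept.mono hW ?_).trans (hM _ ?_ ?_)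
    · intro w hw a ha1 ha2
      simp only [List.mem_cons, List.mem_nil_iff, or_false] at hw
      rcases hw with rfl | rfl
      · exact ⟨_, List.mem_cons_self, ha1, ha2⟩
      · exact ⟨_, List.mem_cons_of_mem _ List.mem_cons_self, ha1, ha2⟩
    · exact List.mem_cons_self
    · simp only [List.mem_cons, List.mem_nil_iff, or_true, or_false]
  have hunF : ShadowUntouched s_114240r.mem s_114286r.mem :=
    fun a h1 h2 => (hunM a h1 h2).trans (hunP a h1 h2)
  have hshF := hsh1.untouched hunF
  have harenaF : ArenaOK (A.1.pushSetup (N)) (A.1.newSetupObj (N) :: A.2)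
      s_114286r.mem g.f := by
    refine ArenaOK.transfer harena1 (ObjEq.of_sameExcept hQ ?_ ?_)
    · intro w hw
      simp only [ArenaFields.wins, List.mem_cons, List.mem_nil_iff, or_false] at hw
      subst hw
      simp only []
      omega
    · intro w hw s hsp
      simp only [ArenaFields.wins, List.mem_cons, List.mem_nil_iff, or_false] at hw hsp
      subst hw
      rcases hsp with rfl | rfl | rfl
      · simp only []
        omega
      · simp only []
        omega
      · simp only []
        omega
  have ea160 : g.e.reg Reg.rdi + 160 = addr (g.f + 160) := by
    rw [ef, ← addr_add_lit, addr_toNat]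
  have ea168 : g.e.reg Reg.rdi + 168 = addr (g.f + 168) := by
    rw [ef, ← addr_add_lit, addr_toNat]
  have hcnt : s_114286r.mem.u32 (g.f + 160) = n + 1 := by
    unfold Mem.u32
    rw [← ea160]
    exact hcntF
  have hcb : s_114286r.mem.u64 (g.f + 168) = A.1.B + A.1.S + 32 := by
    unfold Mem.u64
    rw [← ea168]
    exact hcbF
  have hzero : ZeroFill s_114286r.mem (A.1.B + A.1.S + 32) (N) := by
    intro j hj
    unfold Mem.u8
    have h0 := hfill j (by rw [e2]; exact hj)
    rw [w_rdi_114286, w_rsi_114286, addr_add] at h0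
    exact h0
  have hinvF : abiInv s_114286r := by v_inv
  have hrbpF : s_114286r.reg .rbp = addr g.f := by
    rw [w_kept .rbp rfl]
    exact hb.rbp
  -- every window of the footprint is allowed (`S9.fitWins_ok`: stated apart from the walk, `omega` sees only what it needs)
  have hwin := fitWins_ok hb hfit
  refine ReachVia.done (Or.inl ?_)
  subst hN
  exact c1_exit n hb hn hfit hS2 (fun w hw => (hwin w hw).1) (fun w hw => (hwin w hw).2) hshF harenaF hcnt hcb hzero w_rip
    (by rw [w_rsp]; exact hRw) w_eq hinvF hrbpF

end Vorbis.Spec.start_decoder_9f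

/-- **Unit `start_decoder.9f`** (0x11421f … 0x114286, the request fits): the walk `seg9e_ok` above, at `n` = the value of rax. -/
theorem Vorbis.Spec.Worked.start_decoder_9f_ok : Vorbis.Spec.start_decoder_9f.Statement := by
  intro Lay hLay μ hμ u₀ hcode h_error h_asan_store4_noabort h_setup_malloc h_asan_store8_noabort h_asan_load4_noabort h_memset
    g A v hb hlt hfit
  exact Vorbis.Spec.start_decoder_9f.seg9e_ok Lay hLay μ hμ u₀ hcode h_error h_asan_store4_noabort h_setup_malloc h_asan_store8_noabort
    h_asan_load4_noabort h_memset g A v (v.reg .rax).toNat hb hlt (UInt64.ofNat_toNat).symm _ rfl hfit
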